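-- pv_equiv track=rewrite | github.com/vosslab/biology-problems | biochemistry-problems/bufferslib.py | format_chemical_formula_html
-- ===== SOURCE A (Python) =====
-- def format_chemical_formula_html(chem_state):
-- 	string_list = list(chem_state)
-- 	chem_form = ''
-- 	charge = None
-- 	for character in string_list:
-- 		if charge is not None:
-- 			if character == '1':
-- 				chem_form += '<sup>{0}</sup>'.format(charge)
-- 			else:
-- 				chem_form += '<sup>{0}{1}</sup>'.format(character, charge)
-- 		elif character == '-' or character == '+':
-- 			charge = character
-- 		elif character.isalpha():
-- 			chem_form += character
-- 		elif character.isdigit():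
-- 			chem_form += '<sub>{0}</sub>'.format(character)
--
-- 		else:
-- 			chem_form += character
-- 	return chem_form
-- ===== SOURCE B (Python) =====
-- def format_chemical_formula_html(chem_state):
-- 	# Partition at the first '+'/'-': render the head with sub/sup rules,
-- 	# then render every char of the tail as a superscript carrying that charge.
-- 	head, charge, tail = chem_state, None, ''
-- 	for i, c in enumerate(chem_state):
-- 		if c == '+' or c == '-':
-- 			head, charge, tail = chem_state[:i], c, chem_state[i + 1:]
-- 			break
-- 	out = ''.join('<sub>{0}</sub>'.format(c) if c.isdigit() else c for c in head)
-- 	if charge is not None: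
-- 		out += ''.join('<sup>{0}</sup>'.format(charge) if c == '1'
-- 		               else '<sup>{0}{1}</sup>'.format(c, charge) for c in tail)
-- 	return out
-- ===== Notes on version B (the rewrite author's own statement) =====
-- stated objective: alternative
-- what changed: Replaces A's single stateful scan (a mutable charge flag consulted per character) with a partition at the first sign character followed by two independent stateless renderings (head with sub rules, tail wholly as superscripts).
import Mathlib
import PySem

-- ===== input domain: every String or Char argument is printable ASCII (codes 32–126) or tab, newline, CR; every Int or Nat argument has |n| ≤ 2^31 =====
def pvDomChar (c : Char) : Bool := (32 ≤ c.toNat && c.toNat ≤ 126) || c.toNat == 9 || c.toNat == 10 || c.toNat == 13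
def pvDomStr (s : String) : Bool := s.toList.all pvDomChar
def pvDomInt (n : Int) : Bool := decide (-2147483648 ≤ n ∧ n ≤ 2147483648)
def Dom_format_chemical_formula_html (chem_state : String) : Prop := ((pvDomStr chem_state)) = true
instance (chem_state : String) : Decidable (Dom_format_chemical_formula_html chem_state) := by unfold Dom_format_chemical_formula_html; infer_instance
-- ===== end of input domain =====

-- B replaces A's single stateful scan (mutable charge flag) with a partition at the
-- first sign character and two independent stateless renderings; same cost, clearer.


-- ===== PORT A =====
-- A's loop: one pass with accumulator string and a mutable 'charge' flag.
def fcfLoopA : List Char → String → Option Char → String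
  | [], form, _ => form
  | c :: rest, form, charge =>
    match charge with
    | some ch =>
      if c == '1' then
        fcfLoopA rest (form ++ "<sup>" ++ ch.toString ++ "</sup>") (some ch)
      else
        fcfLoopA rest (form ++ "<sup>" ++ c.toString ++ ch.toString ++ "</sup>") (some ch)
    | none =>
      if c == '-' || c == '+' then fcfLoopA rest form (some c)
      else if PySem.Chars.isalpha c then fcfLoopA rest (form ++ c.toString) none
      else if PySem.Chars.isdigit c then
        fcfLoopA rest (form ++ "<sub>" ++ c.toString ++ "</sub>") none
      else fcfLoopA rest (form ++ c.toString) none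

def format_chemical_formula_html (chem_state : String) : String :=
  fcfLoopA chem_state.toList "" none

-- ===== PORT B =====
-- B's partition: head before the first sign, the sign (if any), the tail after it.
def fcfSplit : List Char → List Char × Option Char × List Char
  | [] => ([], none, [])
  | c :: rest =>
    if c == '+' || c == '-' then ([], some c, rest)
    else
      let r := fcfSplit rest
      (c :: r.1, r.2.1, r.2.2)

def fcfRenderHead (c : Char) : String :=
  if PySem.Chars.isdigit c then "<sub>" ++ c.toString ++ "</sub>" else c.toString

def fcfRenderSup (ch : Char) (c : Char) : String :=
  if c == '1' then "<sup>" ++ ch.toString ++ "</sup>"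
  else "<sup>" ++ c.toString ++ ch.toString ++ "</sup>"

def format_chemical_formula_html_alt (chem_state : String) : String :=
  let r := fcfSplit chem_state.toList
  String.join (r.1.map fcfRenderHead) ++
    match r.2.1 with
    | none => ""
    | some ch => String.join (r.2.2.map (fcfRenderSup ch))

-- ===== PRECONDITION & SPEC =====
def Spec_format_chemical_formula_html (chem_state : String) (out : String) : Prop := out = format_chemical_formula_html_alt chem_state
instance (chem_state : String) (out : String) : Decidable (Spec_format_chemical_formula_html chem_state out) := by unfold Spec_format_chemical_formula_html; infer_instance

-- ===== CLAIM (what is proved, stated in full; the proofs are below) =====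
def Claim_equal_format_chemical_formula_html : Prop := ∀ (chem_state : String), Dom_format_chemical_formula_html chem_state → Spec_format_chemical_formula_html chem_state (format_chemical_formula_html chem_state)

-- ===== LEMMAS AND PROOFS =====

theorem fcf_digit_not_alpha (c : Char) (h : PySem.Chars.isdigit c = true) :
    PySem.Chars.isalpha c = false := by
  simp only [PySem.Chars.isdigit, PySem.Chars.isalpha, PySem.Chars.isupper,
    PySem.Chars.islower, Bool.and_eq_true, Bool.or_eq_false_iff, Bool.and_eq_false_iff,
    decide_eq_true_eq, decide_eq_false_iff_not, Char.le_def, UInt32.le_iff_toNat_le] at *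
  simp only [show '0'.val.toNat = 48 from rfl, show '9'.val.toNat = 57 from rfl,
    show 'A'.val.toNat = 65 from rfl, show 'Z'.val.toNat = 90 from rfl,
    show 'a'.val.toNat = 97 from rfl, show 'z'.val.toNat = 122 from rfl] at *
  omega

theorem fcf_join_cons (s : String) (l : List String) :
    String.join (s :: l) = s ++ String.join l := by
  show ((s :: l).foldl (· ++ ·) "") = s ++ l.foldl (· ++ ·) ""
  have key : ∀ (l : List String) (a b : String),
      l.foldl (· ++ ·) (a ++ b) = a ++ l.foldl (· ++ ·) b := by
    intro l
    induction l with
    | nil => intro a b; rfl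
    | cons x xs ih => intro a b; simp only [List.foldl_cons, String.append_assoc, ih]
  have := key l s ""
  simpa using this

theorem fcfLoopA_some (cs : List Char) (ch : Char) : ∀ form : String,
    fcfLoopA cs form (some ch) = form ++ String.join (cs.map (fcfRenderSup ch)) := by
  induction cs with
  | nil => intro form; simp [fcfLoopA, String.join]
  | cons c rest ih =>
    intro form
    rw [List.map_cons, fcf_join_cons]
    by_cases h1 : c == '1' <;>
      simp only [fcfLoopA, h1, if_pos, if_neg, Bool.false_eq_true,
        not_false_iff, ih, fcfRenderSup, String.append_assoc]

theorem fcfLoopA_none (cs : List Char) : ∀ form : String,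
    fcfLoopA cs form none = form ++
      (let r := fcfSplit cs
       String.join (r.1.map fcfRenderHead) ++
         match r.2.1 with
         | none => ""
         | some ch => String.join (r.2.2.map (fcfRenderSup ch))) := by
  induction cs with
  | nil => intro form; simp [fcfLoopA, fcfSplit, String.join]
  | cons c rest ih =>
    intro form
    by_cases hs : (c == '+' || c == '-')
    · have hs' : (c == '-' || c == '+') = true := by rw [Bool.or_comm]; exact hs
      simp only [fcfSplit, hs, if_pos]
      simp only [fcfLoopA, hs', ite_true]
      rw [fcfLoopA_some]
      simp [String.join]
    · have hs' : (c == '-' || c == '+') = false := by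
        rw [Bool.or_comm]; exact Bool.not_eq_true _ ▸ hs
      have hsf : (c == '+' || c == '-') = false := Bool.not_eq_true _ ▸ hs
      simp only [fcfSplit, hsf, Bool.false_eq_true, ite_false]
      by_cases ha : PySem.Chars.isalpha c = true
      · have hd : PySem.Chars.isdigit c = false := by
          rcases hdd : PySem.Chars.isdigit c with _ | _
          · rfl
          · exact absurd ha (by simp [fcf_digit_not_alpha c hdd])
        simp only [fcfLoopA, hs', Bool.false_eq_true, ite_false, ha, ite_true, ih,
          List.map_cons, fcf_join_cons, fcfRenderHead, hd, String.append_assoc]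
      · have ha' : PySem.Chars.isalpha c = false := Bool.not_eq_true _ ▸ ha
        by_cases hd : PySem.Chars.isdigit c = true
        · simp only [fcfLoopA, hs', Bool.false_eq_true, ite_false, ha', hd, ite_true, ih,
            List.map_cons, fcf_join_cons, fcfRenderHead, String.append_assoc]
        · have hd' : PySem.Chars.isdigit c = false := Bool.not_eq_true _ ▸ hd
          simp only [fcfLoopA, hs', Bool.false_eq_true, ite_false, ha', hd', ih,
            List.map_cons, fcf_join_cons, fcfRenderHead, String.append_assoc]

-- ===== VERDICT (by name: the statement is the Claim_ definition above) =====
theorem format_chemical_formula_html_spec : Claim_equal_format_chemical_formula_html := by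
  intro s _
  show _ = _
  simp [format_chemical_formula_html, format_chemical_formula_html_alt, fcfLoopA_none]
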